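-- pv_equiv track=rewrite | github.com/JesseZhuang/InCodeLearning-Python3 | algorithm/hash/better_compression.py | better_compression
-- ===== SOURCE A (Python) =====
-- def better_compression(s: str) -> str:
--     """n,26"""
--     n, res, i = len(s), [0] * 26, 0
--     while i < n:
--         c, cnt = s[i], 0
--         i += 1
--         while i < n and s[i].isdigit():
--             cnt = cnt * 10 + int(s[i])
--             i += 1
--         res[ord(c) - ord('a')] += cnt
--     return ''.join(chr(i + ord('a')) + str(res[i]) for i in range(26) if res[i])
-- ===== SOURCE B (Python) =====
-- def better_compression(s: str) -> str:
--     # tokenize: one pass building (char, count) pairs, then per-letter totals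
--     tokens = []
--     for ch in s:
--         if ch.isdigit():
--             if tokens:
--                 c, n = tokens[-1]
--                 tokens[-1] = (c, n * 10 + int(ch))
--         else:
--             tokens.append((ch, 0))
--     out = []
--     for c in 'abcdefghijklmnopqrstuvwxyz':
--         total = sum(n for ch, n in tokens if ch == c)
--         if total:
--             out.append(c + str(total))
--     return ''.join(out)
-- ===== Notes on version B (the rewrite author's own statement) =====
-- stated objective: alternative
-- what changed: Replaces the manual index-based while-loop writing into a 26-slot array (with Python's negative-index wraparound) by a two-phase pipeline: a single for-each pass tokenizing the string into (char, count) pairs, then per-letter sums over the token list emitted in alphabetical order.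
-- intended difference: On inputs containing a character in 'G'..'`' followed by a digit run with a nonzero digit, A's negative index ord(c)-97 wraps around and silently adds that count to an unrelated lowercase letter (A('`3') = 'z3'); B ignores such non-lowercase characters and reports only genuine lowercase totals (B('`3') = ''), which is the intended behaviour of a letter-count compressor. — e.g. on better_compression("`3"): A returns "z3", B returns ""
import Mathlib
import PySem

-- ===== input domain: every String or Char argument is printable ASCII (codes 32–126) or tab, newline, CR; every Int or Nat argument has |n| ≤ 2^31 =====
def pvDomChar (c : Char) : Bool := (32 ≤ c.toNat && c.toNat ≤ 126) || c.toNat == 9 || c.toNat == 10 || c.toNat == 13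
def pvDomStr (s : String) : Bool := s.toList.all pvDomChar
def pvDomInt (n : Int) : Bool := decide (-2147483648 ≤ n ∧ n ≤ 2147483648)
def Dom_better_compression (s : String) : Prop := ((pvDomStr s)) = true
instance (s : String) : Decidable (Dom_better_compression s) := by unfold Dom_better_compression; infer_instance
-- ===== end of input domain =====

-- B replaces A's index-based scanner writing into a 26-slot array by a tokenize-then-aggregate
-- pipeline (objective: alternative); on chars 'G'..'`' with a nonzero count A's negative index
-- wraps onto an unrelated letter while B ignores them (see D_ below).

-- ===== PORT A =====
-- int(c) for a digit character c is ord(c) - 48 (exact on the digit chars where both Pythons call it)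
def pvDigitVal (c : Char) : Int := (c.toNat : Int) - 48

-- inner while loop: accumulate the digit run starting at i, return (cnt, new i).
-- fuel is only a totality device: it starts at the string length and never runs out (i increases).
def pvAInner : Nat → List Char → Nat → Nat → Int → Int × Nat
  | 0, _, _, i, cnt => (cnt, i)
  | fuel + 1, l, n, i, cnt =>
    if i < n ∧ PySem.Chars.isdigit (l.getD i ' ') = true then
      pvAInner fuel l n (i + 1) (cnt * 10 + pvDigitVal (l.getD i ' '))
    else (cnt, i)

-- outer while loop; none = IndexError from res[ord(c) - ord('a')]
def pvAOuter : Nat → List Char → Nat → Nat → List Int → Option (List Int)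
  | 0, _, _, _, res => some res
  | fuel + 1, l, n, i, res =>
    if i < n then
      let c := l.getD i ' '
      let r := pvAInner fuel l n (i + 1) 0
      match PySem.List.pyGet? res ((c.toNat : Int) - 97) with
      | none => none
      | some v => pvAOuter fuel l n r.2 (PySem.List.pySetD res ((c.toNat : Int) - 97) (v + r.1))
    else some res

def better_compression (s : String) : String :=
  let l := s.toList
  match pvAOuter l.length l l.length 0 (List.replicate 26 0) with
  | none => ""  -- Python raises IndexError here; excluded by Pre_
  | some res =>
      String.ofList ((PySem.List.pyRange 0 26 1).foldl (fun acc i =>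
        if PySem.List.pyGetD res i 0 ≠ 0 then
          acc ++ Char.ofNat (i.toNat + 97) :: PySem.Int.toChars (PySem.List.pyGetD res i 0)
        else acc) [])

-- ===== PORT B =====
-- first pass of Source B: for ch in s, building the (char, count) token list
def pvBStep (toks : List (Char × Int)) (ch : Char) : List (Char × Int) :=
  if PySem.Chars.isdigit ch = true then
    match toks.getLast? with
    | some cn => toks.dropLast ++ [(cn.1, cn.2 * 10 + pvDigitVal ch)]
    | none => toks
  else toks ++ [(ch, 0)]

def pvBTokens (l : List Char) : List (Char × Int) := l.foldl pvBStep []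

-- total = sum(n for ch, n in tokens if ch == c)
def pvBTotal (toks : List (Char × Int)) (c : Char) : Int :=
  ((toks.filter (fun p => p.1 == c)).map (fun p => p.2)).sum

def better_compression_alt (s : String) : String :=
  let toks := pvBTokens s.toList
  String.ofList (("abcdefghijklmnopqrstuvwxyz".toList).foldl (fun acc c =>
    if pvBTotal toks c ≠ 0 then acc ++ c :: PySem.Int.toChars (pvBTotal toks c) else acc) [])

-- ===== PRECONDITION & SPEC =====
-- Pre_ excludes exactly the inputs on which A raises IndexError: a leading digit, or any
-- non-digit character outside 'G'..'z' (ord 71..122), makes res[ord(c)-97] fall outside [-26, 26).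
def Pre_better_compression (s : String) : Prop :=
  (s.toList.head?.all (fun c => !PySem.Chars.isdigit c)
    && s.toList.all (fun c => PySem.Chars.isdigit c || (71 ≤ c.toNat && c.toNat ≤ 122))) = true
instance (s : String) : Decidable (Pre_better_compression s) := by
  unfold Pre_better_compression; infer_instance

def pvWitness_better_compression : String := "a2b3a1"

-- On inputs with a character in 'G'..'`' (ord 71..96) followed by a digit run containing a nonzero
-- digit, A's negative index ord(c)-97 wraps around and adds the count to an unrelated lowercase
-- letter (A "`3" = "z3"); B ignores such non-lowercase characters (B "`3" = ""), the intended
-- behaviour of a letter-count compressor.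
-- one-pass scanner: pvDScan = normal mode, pvDAfter = "a 'G'..'`' char was seen and
-- only '0' digits since"; true as soon as that char's digit run shows a nonzero digit.
mutual
def pvDScan : List Char → Bool
  | [] => false
  | c :: rest => if 71 ≤ c.toNat && c.toNat ≤ 96 then pvDAfter rest else pvDScan rest
def pvDAfter : List Char → Bool
  | [] => false
  | c :: rest =>
    if PySem.Chars.isdigit c then (if c = '0' then pvDAfter rest else true)
    else if 71 ≤ c.toNat && c.toNat ≤ 96 then pvDAfter rest else pvDScan rest
end

def D_better_compression (s : String) : Prop := pvDScan s.toList = true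
instance (s : String) : Decidable (D_better_compression s) := by
  unfold D_better_compression; infer_instance

def Spec_better_compression (s : String) (out : String) : Prop :=
  ¬ D_better_compression s → out = better_compression_alt s
instance (s : String) (out : String) : Decidable (Spec_better_compression s out) := by
  unfold Spec_better_compression; infer_instance

def pvDiffWitness_better_compression : String := "`3"
def pvDiffWitnessOut_better_compression : String × String := ("z3", "")

-- ===== CLAIM (what is proved, stated in full; the proofs are below) =====
def Claim_unchanged_better_compression : Prop :=
  ∀ (s : String), Dom_better_compression s → Pre_better_compression s →
    Spec_better_compression s (better_compression s)
def Claim_changed_better_compression : Prop :=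
  Dom_better_compression (pvDiffWitness_better_compression) ∧
  Pre_better_compression (pvDiffWitness_better_compression) ∧
  D_better_compression (pvDiffWitness_better_compression) ∧
  better_compression (pvDiffWitness_better_compression) = pvDiffWitnessOut_better_compression.1 ∧
  better_compression_alt (pvDiffWitness_better_compression) = pvDiffWitnessOut_better_compression.2 ∧
  pvDiffWitnessOut_better_compression.1 ≠ pvDiffWitnessOut_better_compression.2

def Claim_exact_better_compression : Prop :=
  ∀ (s : String), Dom_better_compression s → Pre_better_compression s →
    D_better_compression s → better_compression s ≠ better_compression_alt s

-- ===== LEMMAS AND PROOFS =====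

-- value of a digit run folded onto an accumulator (what both inner loops compute)
def pvVal (ds : List Char) (a : Int) : Int := ds.foldl (fun a c => a * 10 + pvDigitVal c) a

-- the (letter, count) token list both programs conceptually traverse
def pvTok : List Char → List (Char × Int)
  | [] => []
  | c :: rest =>
    (c, pvVal (rest.takeWhile PySem.Chars.isdigit) 0)
      :: pvTok (rest.dropWhile PySem.Chars.isdigit)
termination_by l => l.length
decreasing_by
  simp only [List.length_cons]
  have := List.length_dropWhile_le (p := PySem.Chars.isdigit) (l := rest)
  omega

-- the slot of the 26-array that A's res[ord(c)-97] actually touches (negative indices wrap)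
def pvIdx (c : Char) : Nat := if c.toNat < 97 then c.toNat - 71 else c.toNat - 97

def pvApply (res : List Int) (toks : List (Char × Int)) : List Int :=
  toks.foldl (fun r p => r.set (pvIdx p.1) (r.getD (pvIdx p.1) 0 + p.2)) res

theorem pvAInner_spec (l : List Char) : ∀ (f i : Nat) (cnt : Int),
    l.length - i ≤ f →
    pvAInner f l l.length i cnt =
      (pvVal ((l.drop i).takeWhile PySem.Chars.isdigit) cnt,
       i + ((l.drop i).takeWhile PySem.Chars.isdigit).length) := by
  intro f
  induction f with
  | zero =>
    intro i cnt hf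
    have : l.drop i = [] := List.drop_eq_nil_of_le (by omega)
    simp [pvAInner, this, pvVal]
  | succ f ih =>
    intro i cnt hf
    rw [pvAInner]
    by_cases hi : i < l.length
    · have hd : l.drop i = l[i] :: l.drop (i + 1) := List.drop_eq_getElem_cons hi
      have hgd : l.getD i ' ' = l[i] := by
        simp [List.getD, List.getElem?_eq_getElem hi]
      by_cases hdig : PySem.Chars.isdigit l[i] = true
      · rw [if_pos ⟨hi, by rw [hgd]; exact hdig⟩, hgd]
        rw [ih (i + 1) _ (by omega), hd, List.takeWhile_cons_of_pos hdig]
        refine Prod.ext ?_ ?_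
        · simp [pvVal]
        · simp; omega
      · rw [if_neg (by rw [hgd]; tauto)]
        rw [hd, List.takeWhile_cons_of_neg (by simpa using hdig)]
        simp [pvVal]
    · rw [if_neg (by tauto)]
      have : l.drop i = [] := List.drop_eq_nil_of_le (by omega)
      simp [this, pvVal]

theorem pvDropWhile_head (p : Char → Bool) : ∀ (m : List Char) (c : Char),
    (m.dropWhile p).head? = some c → p c = false := by
  intro m
  induction m with
  | nil => simp [List.dropWhile]
  | cons x xs ih =>
    intro c h
    rw [List.dropWhile_cons] at h
    split at h
    · exact ih c h
    · simp_all

theorem pvDropWhile_eq_drop (p : Char → Bool) (m : List Char) :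
    m.dropWhile p = m.drop (m.takeWhile p).length := by
  calc m.dropWhile p = (m.takeWhile p ++ m.dropWhile p).drop (m.takeWhile p).length := by
        rw [List.drop_left]
    _ = m.drop (m.takeWhile p).length := by rw [List.takeWhile_append_dropWhile]

theorem pvGet_eq (res : List Int) (hlen : res.length = 26) (c : Char)
    (h71 : 71 ≤ c.toNat) (h122 : c.toNat ≤ 122) :
    PySem.List.pyGet? res ((c.toNat : Int) - 97) = some (res.getD (pvIdx c) 0) := by
  have hidx : pvIdx c < 26 := by unfold pvIdx; split <;> omega
  have hgd : res.getD (pvIdx c) 0 = res[pvIdx c]'(by omega) := by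
    simp [List.getD, List.getElem?_eq_getElem (by omega : pvIdx c < res.length)]
  rw [hgd]
  simp only [PySem.List.pyGet?, PySem.List.pyIdx?, hlen]
  by_cases h : 97 ≤ c.toNat
  · rw [if_pos (by omega), if_pos (by push_cast; omega)]
    simp only [Option.bind_some]
    have : ((c.toNat : Int) - 97).toNat = pvIdx c := by unfold pvIdx; split <;> omega
    rw [this, List.getElem?_eq_getElem (by omega)]
  · rw [if_neg (by omega), if_pos (by push_cast; omega)]
    simp only [Option.bind_some]
    have : 26 - (-(((c.toNat : Int)) - 97)).toNat = pvIdx c := by unfold pvIdx; split <;> omega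
    rw [this, List.getElem?_eq_getElem (by omega)]

theorem pvSet_eq (res : List Int) (hlen : res.length = 26) (c : Char)
    (h71 : 71 ≤ c.toNat) (h122 : c.toNat ≤ 122) (v : Int) :
    PySem.List.pySetD res ((c.toNat : Int) - 97) v = res.set (pvIdx c) v := by
  simp only [PySem.List.pySetD, PySem.List.pySet?, PySem.List.pyIdx?, hlen]
  by_cases h : 97 ≤ c.toNat
  · rw [if_pos (by omega), if_pos (by push_cast; omega)]
    have : ((c.toNat : Int) - 97).toNat = pvIdx c := by unfold pvIdx; split <;> omega
    simp [this]
  · rw [if_neg (by omega), if_pos (by push_cast; omega)]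
    have h2 : 26 - (97 - c.toNat) = pvIdx c := by unfold pvIdx; split <;> omega
    simp [h2]

theorem pvTok_cons (c : Char) (rest : List Char) :
    pvTok (c :: rest) =
      (c, pvVal (rest.takeWhile PySem.Chars.isdigit) 0)
        :: pvTok (rest.dropWhile PySem.Chars.isdigit) := by
  rw [pvTok]

theorem pvAOuter_spec (l : List Char) : ∀ (f i : Nat) (res : List Int),
    l.length - i ≤ f → i ≤ l.length → res.length = 26 →
    (∀ c ∈ l, PySem.Chars.isdigit c = true ∨ (71 ≤ c.toNat ∧ c.toNat ≤ 122)) →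
    (∀ c, (l.drop i).head? = some c → PySem.Chars.isdigit c = false) →
    pvAOuter f l l.length i res = some (pvApply res (pvTok (l.drop i))) := by
  intro f
  induction f with
  | zero =>
    intro i res hf hi hlen hPre hHead
    have hdrop : l.drop i = [] := List.drop_eq_nil_of_le (by omega)
    simp [pvAOuter, hdrop, pvTok, pvApply]
  | succ f ih =>
    intro i res hf hi hlen hPre hHead
    rw [pvAOuter]
    by_cases hilt : i < l.length
    · rw [if_pos hilt]
      have hd : l.drop i = l[i] :: l.drop (i + 1) := List.drop_eq_getElem_cons hilt
      have hgd : l.getD i ' ' = l[i] := by simp [List.getD, List.getElem?_eq_getElem hilt]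
      have hdigF : PySem.Chars.isdigit l[i] = false := hHead _ (by rw [hd]; rfl)
      have hrng : 71 ≤ l[i].toNat ∧ l[i].toNat ≤ 122 := by
        rcases hPre l[i] (List.getElem_mem _) with h | h
        · rw [hdigF] at h; cases h
        · exact h
      have hinner := pvAInner_spec l f (i + 1) 0 (by omega)
      simp only [hgd, hinner, pvGet_eq res hlen _ hrng.1 hrng.2,
        pvSet_eq res hlen _ hrng.1 hrng.2]
      have htlen : ((l.drop (i + 1)).takeWhile PySem.Chars.isdigit).length ≤ l.length - (i + 1) := by
        have h1 := (List.takeWhile_sublist (p := PySem.Chars.isdigit) (l := l.drop (i + 1))).length_le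
        simpa using h1
      have hdw : l.drop (i + 1 + ((l.drop (i + 1)).takeWhile PySem.Chars.isdigit).length)
          = (l.drop (i + 1)).dropWhile PySem.Chars.isdigit := by
        rw [pvDropWhile_eq_drop, List.drop_drop]
      rw [ih (i + 1 + ((l.drop (i + 1)).takeWhile PySem.Chars.isdigit).length)
            (res.set (pvIdx l[i]) (res.getD (pvIdx l[i]) 0 + pvVal ((l.drop (i + 1)).takeWhile PySem.Chars.isdigit) 0))
            (by omega) (by omega) (by simp [hlen])
            hPre
            (by rw [hdw]; exact fun c hc => pvDropWhile_head _ _ c hc)]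
      rw [hdw, hd, pvTok_cons]
      simp [pvApply]
    · rw [if_neg hilt]
      have hdrop : l.drop i = [] := List.drop_eq_nil_of_le (by omega)
      simp [hdrop, pvTok, pvApply]

theorem pvApply_getD : ∀ (toks : List (Char × Int)) (res : List Int) (k : Nat),
    res.length = 26 → k < 26 → (∀ p ∈ toks, pvIdx p.1 < 26) →
    (pvApply res toks).getD k 0 =
      res.getD k 0 + (toks.map (fun p => if pvIdx p.1 = k then p.2 else 0)).sum := by
  intro toks
  induction toks with
  | nil => intro res k _ _ _; simp [pvApply]
  | cons p toks ih =>
    intro res k hlen hk hidx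
    have hp : pvIdx p.1 < 26 := hidx p (by simp)
    have hstep : pvApply res (p :: toks)
        = pvApply (res.set (pvIdx p.1) (res.getD (pvIdx p.1) 0 + p.2)) toks := by
      simp [pvApply]
    rw [hstep, ih _ k (by simp [hlen]) hk (fun q hq => hidx q (by simp [hq]))]
    have hset : (res.set (pvIdx p.1) (res.getD (pvIdx p.1) 0 + p.2)).getD k 0
        = if pvIdx p.1 = k then res.getD (pvIdx p.1) 0 + p.2 else res.getD k 0 := by
      by_cases h : pvIdx p.1 = k
      · subst h
        simp [List.getD, hlen, hp]
      · simp only [List.getD]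
        rw [List.getElem?_set_ne h, if_neg h]
    rw [hset]
    simp only [List.map_cons, List.sum_cons]
    by_cases h : pvIdx p.1 = k
    · rw [if_pos h, if_pos h, h]; ring
    · rw [if_neg h, if_neg h]; ring

theorem pvTok_decomp : ∀ (m : List Char) (p : Char × Int), p ∈ pvTok m →
    ∃ pre ds post, m = pre ++ p.1 :: (ds ++ post) ∧
      (∀ c ∈ ds, PySem.Chars.isdigit c = true) ∧ p.2 = pvVal ds 0 := by
  intro m
  induction m using pvTok.induct with
  | case1 => intro p hp; simp [pvTok] at hp
  | case2 c rest ih =>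
    intro p hp
    rw [pvTok_cons] at hp
    rcases List.mem_cons.mp hp with h | h
    · refine ⟨[], rest.takeWhile PySem.Chars.isdigit, rest.dropWhile PySem.Chars.isdigit, ?_, ?_, ?_⟩
      · simp [h, List.takeWhile_append_dropWhile]
      · exact fun x hx => List.mem_takeWhile_imp hx
      · simp [h]
    · obtain ⟨pre, ds, post, hm, hds, hv⟩ := ih p h
      refine ⟨c :: rest.takeWhile PySem.Chars.isdigit ++ pre, ds, post, ?_, hds, hv⟩
      have hsplit : rest = rest.takeWhile PySem.Chars.isdigit ++ rest.dropWhile PySem.Chars.isdigit :=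
        (List.takeWhile_append_dropWhile).symm
      conv_lhs => rw [hsplit, hm]
      simp [List.append_assoc]

theorem pvTok_lead : ∀ (m : List Char),
    (∀ c, m.head? = some c → PySem.Chars.isdigit c = false) →
    ∀ p ∈ pvTok m, PySem.Chars.isdigit p.1 = false ∧ p.1 ∈ m := by
  intro m
  induction m using pvTok.induct with
  | case1 => intro _ p hp; simp [pvTok] at hp
  | case2 c rest ih =>
    intro hHead p hp
    rw [pvTok_cons] at hp
    rcases List.mem_cons.mp hp with h | h
    · subst h
      exact ⟨hHead c rfl, by simp⟩
    · have hH : ∀ c', (rest.dropWhile PySem.Chars.isdigit).head? = some c' →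
          PySem.Chars.isdigit c' = false := fun c' hc' => pvDropWhile_head _ _ c' hc'
      obtain ⟨h1, h2⟩ := ih hH p h
      exact ⟨h1, List.mem_cons_of_mem c ((List.dropWhile_sublist _).mem h2)⟩

theorem pvVal_zero : ∀ (ds : List Char), (∀ c ∈ ds, c = '0') → pvVal ds 0 = 0 := by
  intro ds h
  induction ds with
  | nil => simp [pvVal]
  | cons c ds ih =>
    have hc : c = '0' := h c (by simp)
    have : pvVal (c :: ds) 0 = pvVal ds 0 := by
      simp [pvVal, hc, pvDigitVal]
    rw [this]
    exact ih (fun x hx => h x (by simp [hx]))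

theorem pvDAfter_digits : ∀ (ds post : List Char),
    (∀ c ∈ ds, PySem.Chars.isdigit c = true) → (∃ c ∈ ds, c ≠ '0') →
    pvDAfter (ds ++ post) = true := by
  intro ds
  induction ds with
  | nil => intro _ _ hex; simp at hex
  | cons d ds ih =>
    intro post hds hex
    rw [List.cons_append, pvDAfter, if_pos (hds d (by simp))]
    by_cases hd0 : d = '0'
    · rw [if_pos hd0]
      obtain ⟨c, hc, hcne⟩ := hex
      rcases List.mem_cons.mp hc with h | h
      · exact absurd (h.trans hd0) hcne
      · exact ih post (fun x hx => hds x (by simp [hx])) ⟨c, h, hcne⟩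
    · rw [if_neg hd0]

theorem pvDScan_append : ∀ (pre l : List Char),
    pvDScan l = true → pvDAfter l = true →
    pvDScan (pre ++ l) = true ∧ pvDAfter (pre ++ l) = true := by
  intro pre
  induction pre with
  | nil => intro l h1 h2; simpa using ⟨h1, h2⟩
  | cons c pre ih =>
    intro l h1 h2
    obtain ⟨ihs, iha⟩ := ih l h1 h2
    constructor
    · rw [List.cons_append, pvDScan]
      split
      · exact iha
      · exact ihs
    · rw [List.cons_append, pvDAfter]
      split
      · split
        · exact iha
        · rfl
      · split
        · exact iha
        · exact ihs

-- B's for-each pass absorbs a digit run into the last token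
theorem pvB_digits : ∀ (ds : List Char), (∀ c ∈ ds, PySem.Chars.isdigit c = true) →
    ∀ (rest : List Char) (ts : List (Char × Int)) (c : Char) (n : Int),
    List.foldl pvBStep (ts ++ [(c, n)]) (ds ++ rest) =
      List.foldl pvBStep (ts ++ [(c, pvVal ds n)]) rest := by
  intro ds
  induction ds with
  | nil => intro _ _ _ _ _; simp [pvVal]
  | cons d ds ih =>
    intro hdig rest ts c n
    have hd : PySem.Chars.isdigit d = true := hdig d (by simp)
    have hstep : pvBStep (ts ++ [(c, n)]) d = ts ++ [(c, n * 10 + pvDigitVal d)] := by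
      simp [pvBStep, hd]
    rw [List.cons_append, List.foldl_cons, hstep,
      ih (fun x hx => hdig x (by simp [hx])) rest ts c (n * 10 + pvDigitVal d)]
    have : pvVal (d :: ds) n = pvVal ds (n * 10 + pvDigitVal d) := by simp [pvVal]
    rw [this]

theorem pvB_main : ∀ (m : List Char) (ts : List (Char × Int)),
    (∀ c, m.head? = some c → PySem.Chars.isdigit c = false) →
    List.foldl pvBStep ts m = ts ++ pvTok m := by
  intro m
  induction m using pvTok.induct with
  | case1 => intro ts _; simp [pvTok]
  | case2 c rest ih =>
    intro ts hHead
    have hc : PySem.Chars.isdigit c = false := hHead c rfl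
    have hstep : pvBStep ts c = ts ++ [(c, 0)] := by simp [pvBStep, hc]
    rw [List.foldl_cons, hstep]
    conv_lhs => rw [← List.takeWhile_append_dropWhile (p := PySem.Chars.isdigit) (l := rest)]
    rw [pvB_digits _ (fun x hx => List.mem_takeWhile_imp hx) _ ts c 0]
    rw [ih _ (fun c' hc' => pvDropWhile_head _ _ c' hc'), pvTok_cons]
    simp

theorem pvBTotal_ite (toks : List (Char × Int)) (c : Char) :
    pvBTotal toks c = (toks.map (fun p => if p.1 == c then p.2 else 0)).sum := by
  induction toks with
  | nil => simp [pvBTotal]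
  | cons p toks ih =>
    simp only [pvBTotal, List.filter_cons] at *
    have ih' := ih
    simp only [beq_iff_eq] at ih'
    by_cases h : p.1 = c
    · simp [h, ih']
    · simp [h, ih']

-- ---- decimal-representation facts (for the tightness theorem) ----
theorem pvToDigitsCore_eq : ∀ (f n : Nat) (ds : List Char), n < f → n ≠ 0 →
    Nat.toDigitsCore 10 f n ds = ((Nat.digits 10 n).map Nat.digitChar).reverse ++ ds := by
  intro f
  induction f with
  | zero => intro n ds h _; omega
  | succ f ih =>
    intro n ds h hn
    rw [Nat.toDigitsCore]
    by_cases h10 : n / 10 = 0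
    · rw [if_pos h10]
      have hlt : n < 10 := by omega
      rw [Nat.digits_of_lt 10 n hn hlt, Nat.mod_eq_of_lt hlt]
      simp
    · rw [if_neg h10]
      rw [ih (n / 10) _ (by omega) h10]
      rw [Nat.digits_def' (by norm_num : (1:Nat) < 10) (by omega : 0 < n)]
      simp [List.append_assoc]

theorem pvMapDigitChar_inj : ∀ (l1 l2 : List Nat), (∀ x ∈ l1, x < 10) → (∀ x ∈ l2, x < 10) →
    l1.map Nat.digitChar = l2.map Nat.digitChar → l1 = l2 := by
  intro l1
  induction l1 with
  | nil => intro l2 _ _ h; cases l2 <;> simp_all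
  | cons x l1 ih =>
    intro l2 h1 h2 h
    cases l2 with
    | nil => simp at h
    | cons y l2 =>
      simp only [List.map_cons, List.cons.injEq] at h
      have hx : x < 10 := h1 x (by simp)
      have hy : y < 10 := h2 y (by simp)
      have hxy : x = y := by
        have hh := h.1
        interval_cases x <;> interval_cases y <;> first | rfl | (exfalso; revert hh; decide)
      rw [hxy, ih l2 (fun z hz => h1 z (by simp [hz])) (fun z hz => h2 z (by simp [hz])) h.2]

theorem pvToChars_inj (a b : Int) (ha : 0 < a) (hb : 0 < b)
    (h : PySem.Int.toChars a = PySem.Int.toChars b) : a = b := by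
  unfold PySem.Int.toChars at h
  rw [if_neg (by omega), if_neg (by omega)] at h
  unfold Nat.toDigits at h
  rw [pvToDigitsCore_eq _ _ _ (by omega) (by omega),
    pvToDigitsCore_eq _ _ _ (by omega) (by omega)] at h
  simp only [List.append_nil] at h
  have h2 := List.reverse_injective h
  have h3 : Nat.digits 10 a.toNat = Nat.digits 10 b.toNat :=
    pvMapDigitChar_inj _ _ (fun x hx => Nat.digits_lt_base (by norm_num) hx)
      (fun x hx => Nat.digits_lt_base (by norm_num) hx) h2
  have := Nat.digits_inj_iff.mp h3
  omega

theorem pvToChars_digits (n : Int) (hn : 0 < n) :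
    (∀ c ∈ PySem.Int.toChars n, PySem.Chars.isdigit c = true) ∧ PySem.Int.toChars n ≠ [] := by
  unfold PySem.Int.toChars
  rw [if_neg (by omega)]
  unfold Nat.toDigits
  rw [pvToDigitsCore_eq _ _ _ (by omega) (by omega)]
  simp only [List.append_nil]
  constructor
  · intro c hc
    rw [List.mem_reverse] at hc
    obtain ⟨d, hd, hdc⟩ := List.mem_map.mp hc
    have hdlt : d < 10 := Nat.digits_lt_base (by norm_num) hd
    subst hdc
    interval_cases d <;> decide
  · simp only [ne_eq, List.reverse_eq_nil_iff, List.map_eq_nil_iff]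
    exact Nat.digits_ne_nil_iff_ne_zero.mpr (by omega)

-- ---- digit-character bounds and value signs ----
theorem pvIsdigit_bounds (c : Char) (h : PySem.Chars.isdigit c = true) :
    48 ≤ c.toNat ∧ c.toNat ≤ 57 := by
  simp [PySem.Chars.isdigit, Char.le_def] at h
  exact ⟨h.1, h.2⟩

theorem pvIsdigit_false_of_ge (c : Char) (h : 58 ≤ c.toNat) :
    PySem.Chars.isdigit c = false := by
  by_contra hcon
  have := pvIsdigit_bounds c (by simpa using hcon)
  omega

theorem pvVal_nonneg : ∀ (ds : List Char), (∀ c ∈ ds, PySem.Chars.isdigit c = true) →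
    ∀ a : Int, 0 ≤ a → 0 ≤ pvVal ds a := by
  intro ds
  induction ds with
  | nil => intro _ a ha; simpa [pvVal] using ha
  | cons d ds ih =>
    intro hds a ha
    have hb := pvIsdigit_bounds d (hds d (by simp))
    have : pvVal (d :: ds) a = pvVal ds (a * 10 + pvDigitVal d) := by simp [pvVal]
    rw [this]
    exact ih (fun x hx => hds x (by simp [hx])) _ (by unfold pvDigitVal; omega)

theorem pvVal_pos : ∀ (ds : List Char), (∀ c ∈ ds, PySem.Chars.isdigit c = true) →
    ∀ a : Int, 0 < a → 0 < pvVal ds a := by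
  intro ds
  induction ds with
  | nil => intro _ a ha; simpa [pvVal] using ha
  | cons d ds ih =>
    intro hds a ha
    have hb := pvIsdigit_bounds d (hds d (by simp))
    have : pvVal (d :: ds) a = pvVal ds (a * 10 + pvDigitVal d) := by simp [pvVal]
    rw [this]
    exact ih (fun x hx => hds x (by simp [hx])) _ (by unfold pvDigitVal; omega)

theorem pvVal_pos_of_exists : ∀ (ds : List Char), (∀ c ∈ ds, PySem.Chars.isdigit c = true) →
    (∃ c ∈ ds, c ≠ '0') → 0 < pvVal ds 0 := by
  intro ds
  induction ds with
  | nil => intro _ hex; simp at hex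
  | cons d ds ih =>
    intro hds hex
    have hb := pvIsdigit_bounds d (hds d (by simp))
    have hstep : pvVal (d :: ds) 0 = pvVal ds (0 * 10 + pvDigitVal d) := by simp [pvVal]
    by_cases hd0 : d = '0'
    · have : pvDigitVal d = 0 := by rw [hd0]; rfl
      rw [hstep, this]
      norm_num
      obtain ⟨c, hc, hcne⟩ := hex
      rcases List.mem_cons.mp hc with h | h
      · exact absurd (h.trans hd0) hcne
      · exact ih (fun x hx => hds x (by simp [hx])) ⟨c, h, hcne⟩
    · rw [hstep]
      apply pvVal_pos ds (fun x hx => hds x (by simp [hx]))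
      have : d.toNat ≠ 48 := by
        intro hcon
        apply hd0
        have h0 := congrArg Char.ofNat hcon
        rw [Char.ofNat_toNat] at h0
        rw [h0]
      unfold pvDigitVal
      omega

theorem pvTok_val_nonneg (l : List Char) : ∀ p ∈ pvTok l, 0 ≤ p.2 := by
  intro p hp
  obtain ⟨pre, ds, post, _, hds, hv⟩ := pvTok_decomp l p hp
  rw [hv]
  exact pvVal_nonneg ds hds 0 le_rfl

-- ---- scanner characterization: D_ produces a wrapped positive token ----
theorem pvDAfter_eq_scan (l : List Char)
    (h : ∀ c, l.head? = some c → PySem.Chars.isdigit c = false) :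
    pvDAfter l = pvDScan l := by
  cases l with
  | nil => rfl
  | cons c rest =>
    rw [pvDAfter, pvDScan, if_neg (by rw [h c rfl]; simp)]

theorem pvDAfter_zeros : ∀ (ds rest : List Char), (∀ c ∈ ds, c = '0') →
    pvDAfter (ds ++ rest) = pvDAfter rest := by
  intro ds
  induction ds with
  | nil => simp
  | cons d ds ih =>
    intro rest h0
    have hd0 : d = '0' := h0 d (by simp)
    rw [List.cons_append, pvDAfter, if_pos (by rw [hd0]; decide), if_pos hd0]
    exact ih rest (fun x hx => h0 x (by simp [hx]))

theorem pvDScan_digits : ∀ (ds rest : List Char), (∀ c ∈ ds, PySem.Chars.isdigit c = true) →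
    pvDScan (ds ++ rest) = pvDScan rest := by
  intro ds
  induction ds with
  | nil => simp
  | cons d ds ih =>
    intro rest hds
    have hb := pvIsdigit_bounds d (hds d (by simp))
    rw [List.cons_append, pvDScan,
      if_neg (by simp only [Bool.and_eq_true, decide_eq_true_eq]; omega)]
    exact ih rest (fun x hx => hds x (by simp [hx]))

theorem pvScan_to_token : ∀ (m : List Char),
    (∀ c, m.head? = some c → PySem.Chars.isdigit c = false) →
    pvDScan m = true →
    ∃ p ∈ pvTok m, (71 ≤ p.1.toNat ∧ p.1.toNat ≤ 96) ∧ 0 < p.2 := by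
  intro m
  induction m using pvTok.induct with
  | case1 => intro _ h; rw [pvDScan] at h; cases h
  | case2 c rest ih =>
    intro hHead hscan
    have hsplit : rest = rest.takeWhile PySem.Chars.isdigit ++ rest.dropWhile PySem.Chars.isdigit :=
      (List.takeWhile_append_dropWhile).symm
    have hdig : ∀ x ∈ rest.takeWhile PySem.Chars.isdigit, PySem.Chars.isdigit x = true :=
      fun x hx => List.mem_takeWhile_imp hx
    have hdropHead : ∀ x, (rest.dropWhile PySem.Chars.isdigit).head? = some x →
        PySem.Chars.isdigit x = false := fun x hx => pvDropWhile_head _ _ x hx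
    by_cases hwrap : (71 ≤ c.toNat && c.toNat ≤ 96) = true
    · rw [pvDScan, if_pos hwrap] at hscan
      by_cases hz : ∀ x ∈ rest.takeWhile PySem.Chars.isdigit, x = '0'
      · rw [hsplit, pvDAfter_zeros _ _ hz, pvDAfter_eq_scan _ hdropHead] at hscan
        obtain ⟨p, hp, hpw, hppos⟩ := ih hdropHead hscan
        exact ⟨p, by rw [pvTok_cons]; exact List.mem_cons_of_mem _ hp, hpw, hppos⟩
      · push Not at hz
        refine ⟨(c, pvVal (rest.takeWhile PySem.Chars.isdigit) 0), by rw [pvTok_cons]; simp, ?_, ?_⟩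
        · simp only [Bool.and_eq_true, decide_eq_true_eq] at hwrap
          exact hwrap
        · exact pvVal_pos_of_exists _ hdig hz
    · rw [pvDScan, if_neg hwrap] at hscan
      rw [hsplit, pvDScan_digits _ _ hdig] at hscan
      have hscan' : pvDScan (rest.dropWhile PySem.Chars.isdigit) = true := hscan
      obtain ⟨p, hp, hpw, hppos⟩ := ih hdropHead hscan'
      exact ⟨p, by rw [pvTok_cons]; exact List.mem_cons_of_mem _ hp, hpw, hppos⟩

-- ---- block decomposition of both outputs ----
def pvGfun (v : Nat → Int) (k : Nat) : List Char :=
  if v k ≠ 0 then Char.ofNat (k + 97) :: PySem.Int.toChars (v k) else []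

theorem pvOfNat97 (k : Nat) (hk : k < 26) : (Char.ofNat (k + 97)).toNat = k + 97 := by
  rw [Char.toNat_ofNat, if_pos (Or.inl (by omega))]

theorem pvIdx_ofNat (k : Nat) (hk : k < 26) : pvIdx (Char.ofNat (k + 97)) = k := by
  unfold pvIdx
  rw [pvOfNat97 k hk, if_neg (by omega)]
  omega

theorem pvFold_blocks : ∀ (ks : List Nat) (v : Nat → Int) (f : List Char → Nat → List Char),
    (∀ (acc : List Char), ∀ k ∈ ks, f acc k = acc ++ pvGfun v k) →
    ∀ acc, ks.foldl f acc = acc ++ ks.flatMap (pvGfun v) := by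
  intro ks
  induction ks with
  | nil => intro v f _ acc; simp
  | cons k t ih =>
    intro v f hf acc
    rw [List.foldl_cons, hf acc k (by simp),
      ih v f (fun a x hx => hf a x (by simp [hx])) (acc ++ pvGfun v k)]
    rw [List.flatMap_cons, List.append_assoc]

theorem pvFlatHead : ∀ (ks : List Nat) (v : Nat → Int) (x : Char),
    (ks.flatMap (pvGfun v)).head? = some x → ∃ j ∈ ks, x = Char.ofNat (j + 97) := by
  intro ks
  induction ks with
  | nil => intro v x h; simp at h
  | cons k t ih =>
    intro v x h
    rw [List.flatMap_cons, List.head?_append] at h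
    by_cases hv : v k ≠ 0
    · have : pvGfun v k = Char.ofNat (k + 97) :: PySem.Int.toChars (v k) := by
        simp [pvGfun, hv]
      rw [this] at h
      simp at h
      exact ⟨k, by simp, h.symm⟩
    · have : pvGfun v k = [] := by simp [pvGfun]; simpa using hv
      rw [this] at h
      simp at h
      obtain ⟨j, hj, hxj⟩ := ih v x h
      exact ⟨j, by simp [hj], hxj⟩

theorem pvTakeDigits : ∀ (d r : List Char), (∀ c ∈ d, PySem.Chars.isdigit c = true) →
    (∀ x, r.head? = some x → PySem.Chars.isdigit x = false) →
    (d ++ r).takeWhile PySem.Chars.isdigit = d ∧ (d ++ r).dropWhile PySem.Chars.isdigit = r := by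
  intro d
  induction d with
  | nil =>
    intro r _ hr
    cases r with
    | nil => simp
    | cons x rs =>
      simp only [List.nil_append]
      rw [List.takeWhile_cons_of_neg (by rw [hr x rfl]; simp),
        List.dropWhile_cons_of_neg (by rw [hr x rfl]; simp)]
      exact ⟨rfl, rfl⟩
  | cons c d ih =>
    intro r hd hr
    have hc : PySem.Chars.isdigit c = true := hd c (by simp)
    rw [List.cons_append, List.takeWhile_cons_of_pos hc, List.dropWhile_cons_of_pos hc]
    obtain ⟨h1, h2⟩ := ih r (fun x hx => hd x (by simp [hx])) hr
    exact ⟨by rw [h1], h2⟩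

theorem pvJoin_inj : ∀ (ks : List Nat), (∀ k ∈ ks, k < 26) → ks.Nodup →
    ∀ (v1 v2 : Nat → Int), (∀ k ∈ ks, 0 ≤ v1 k) → (∀ k ∈ ks, 0 ≤ v2 k) →
    ks.flatMap (pvGfun v1) = ks.flatMap (pvGfun v2) → ∀ k ∈ ks, v1 k = v2 k := by
  intro ks
  induction ks with
  | nil => intro _ _ _ _ _ _ _ k hk; simp at hk
  | cons k t ih =>
    intro hlt hnd v1 v2 hn1 hn2 heq j hj
    have hk26 : k < 26 := hlt k (by simp)
    rw [List.flatMap_cons, List.flatMap_cons] at heq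
    have hrest : ∀ (v : Nat → Int) (x : Char), (t.flatMap (pvGfun v)).head? = some x →
        PySem.Chars.isdigit x = false ∧ x ≠ Char.ofNat (k + 97) := by
      intro v x hx
      obtain ⟨j', hj', hxj⟩ := pvFlatHead t v x hx
      have hj26 : j' < 26 := hlt j' (by simp [hj'])
      subst hxj
      constructor
      · apply pvIsdigit_false_of_ge
        rw [pvOfNat97 _ hj26]
        omega
      · intro hcon
        have h := congrArg Char.toNat hcon
        rw [pvOfNat97 _ hj26, pvOfNat97 _ hk26] at h
        have hjk : j' = k := by omega
        subst hjk
        exact (List.nodup_cons.mp hnd).1 hj'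
    by_cases h1 : v1 k = 0 <;> by_cases h2 : v2 k = 0
    · have hg1 : pvGfun v1 k = [] := by simp [pvGfun, h1]
      have hg2 : pvGfun v2 k = [] := by simp [pvGfun, h2]
      rw [hg1, hg2, List.nil_append, List.nil_append] at heq
      rcases List.mem_cons.mp hj with rfl | hjt
      · rw [h1, h2]
      · exact ih (fun x hx => hlt x (by simp [hx])) (List.nodup_cons.mp hnd).2 v1 v2
          (fun x hx => hn1 x (by simp [hx])) (fun x hx => hn2 x (by simp [hx])) heq j hjt
    · exfalso
      have hg1 : pvGfun v1 k = [] := by simp [pvGfun, h1]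
      have hg2 : pvGfun v2 k = Char.ofNat (k + 97) :: PySem.Int.toChars (v2 k) := by
        simp [pvGfun, h2]
      rw [hg1, hg2, List.nil_append, List.cons_append] at heq
      have : (t.flatMap (pvGfun v1)).head? = some (Char.ofNat (k + 97)) := by rw [heq]; rfl
      exact (hrest v1 _ this).2 rfl
    · exfalso
      have hg1 : pvGfun v1 k = Char.ofNat (k + 97) :: PySem.Int.toChars (v1 k) := by
        simp [pvGfun, h1]
      have hg2 : pvGfun v2 k = [] := by simp [pvGfun, h2]
      rw [hg1, hg2, List.nil_append, List.cons_append] at heq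
      have : (t.flatMap (pvGfun v2)).head? = some (Char.ofNat (k + 97)) := by rw [← heq]; rfl
      exact (hrest v2 _ this).2 rfl
    · have hp1 : 0 < v1 k := lt_of_le_of_ne (hn1 k (by simp)) (Ne.symm h1)
      have hp2 : 0 < v2 k := lt_of_le_of_ne (hn2 k (by simp)) (Ne.symm h2)
      have hg1 : pvGfun v1 k = Char.ofNat (k + 97) :: PySem.Int.toChars (v1 k) := by
        simp [pvGfun, h1]
      have hg2 : pvGfun v2 k = Char.ofNat (k + 97) :: PySem.Int.toChars (v2 k) := by
        simp [pvGfun, h2]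
      rw [hg1, hg2, List.cons_append, List.cons_append] at heq
      have heq2 : PySem.Int.toChars (v1 k) ++ t.flatMap (pvGfun v1)
          = PySem.Int.toChars (v2 k) ++ t.flatMap (pvGfun v2) := by
        injection heq
      obtain ⟨hd1, _⟩ := pvToChars_digits (v1 k) hp1
      obtain ⟨hd2, _⟩ := pvToChars_digits (v2 k) hp2
      have ht1 := pvTakeDigits (PySem.Int.toChars (v1 k)) (t.flatMap (pvGfun v1)) hd1
        (fun x hx => (hrest v1 x hx).1)
      have ht2 := pvTakeDigits (PySem.Int.toChars (v2 k)) (t.flatMap (pvGfun v2)) hd2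
        (fun x hx => (hrest v2 x hx).1)
      have hvv : PySem.Int.toChars (v1 k) = PySem.Int.toChars (v2 k) := by
        rw [← ht1.1, ← ht2.1, heq2]
      have hfl : t.flatMap (pvGfun v1) = t.flatMap (pvGfun v2) := by
        rw [← ht1.2, ← ht2.2, heq2]
      rcases List.mem_cons.mp hj with rfl | hjt
      · exact pvToChars_inj _ _ hp1 hp2 hvv
      · exact ih (fun x hx => hlt x (by simp [hx])) (List.nodup_cons.mp hnd).2 v1 v2
          (fun x hx => hn1 x (by simp [hx])) (fun x hx => hn2 x (by simp [hx])) hfl j hjt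

theorem better_compression_spec : Claim_unchanged_better_compression := by
  unfold Claim_unchanged_better_compression
  intro s _hDom hPre
  unfold Spec_better_compression
  intro hD
  unfold Pre_better_compression at hPre
  rw [Bool.and_eq_true] at hPre
  obtain ⟨hHeadB, hAllB⟩ := hPre
  have hHead : ∀ c, s.toList.head? = some c → PySem.Chars.isdigit c = false := by
    intro c hc
    rw [hc] at hHeadB
    simpa using hHeadB
  have hAll : ∀ c ∈ s.toList, PySem.Chars.isdigit c = true ∨ (71 ≤ c.toNat ∧ c.toNat ≤ 122) := by
    intro c hcmem
    have h := (List.all_eq_true.mp hAllB) c hcmem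
    rw [Bool.or_eq_true, Bool.and_eq_true] at h
    rcases h with h | h
    · exact Or.inl h
    · exact Or.inr ⟨by exact_mod_cast of_decide_eq_true h.1, by exact_mod_cast of_decide_eq_true h.2⟩
  have houter := pvAOuter_spec s.toList s.toList.length 0 (List.replicate 26 0) (by omega)
      (by omega) (by simp) hAll (by simpa using hHead)
  have htoklead := pvTok_lead s.toList hHead
  have hrng : ∀ p ∈ pvTok s.toList, 71 ≤ p.1.toNat ∧ p.1.toNat ≤ 122 := by
    intro p hp
    obtain ⟨h1, h2⟩ := htoklead p hp
    rcases hAll p.1 h2 with h | h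
    · rw [h1] at h; cases h
    · exact h
  have hidx : ∀ p ∈ pvTok s.toList, pvIdx p.1 < 26 := by
    intro p hp
    have := hrng p hp
    unfold pvIdx; split <;> omega
  have hwrap : ∀ p ∈ pvTok s.toList, p.1.toNat ≤ 96 → p.2 = 0 := by
    intro p hp hle
    by_contra hne
    apply hD
    obtain ⟨pre, ds, post, hm, hds, hv⟩ := pvTok_decomp s.toList p hp
    have hex : ∃ c ∈ ds, c ≠ '0' := by
      by_contra hAll0
      push Not at hAll0
      exact hne (hv.trans (pvVal_zero ds hAll0))
    have hwrapc : (71 ≤ p.1.toNat && p.1.toNat ≤ 96) = true := by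
      have := (hrng p hp).1
      simp only [Bool.and_eq_true, decide_eq_true_eq]
      omega
    have hafter : pvDAfter (ds ++ post) = true := pvDAfter_digits ds post hds hex
    have hscan : pvDScan (p.1 :: (ds ++ post)) = true := by
      rw [pvDScan, if_pos hwrapc]
      exact hafter
    have hafter2 : pvDAfter (p.1 :: (ds ++ post)) = true := by
      rw [pvDAfter, if_neg (by rw [(htoklead p hp).1]; simp), if_pos hwrapc]
      exact hafter
    unfold D_better_compression
    rw [hm]
    exact (pvDScan_append pre _ hscan hafter2).1
  have hB : pvBTokens s.toList = pvTok s.toList := by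
    unfold pvBTokens
    rw [pvB_main s.toList [] hHead]
    simp
  have hkey : ∀ k : Nat, k < 26 →
      (pvApply (List.replicate 26 0) (pvTok s.toList)).getD k 0
        = pvBTotal (pvTok s.toList) (Char.ofNat (k + 97)) := by
    intro k hk
    rw [pvApply_getD (pvTok s.toList) _ k (by simp) hk hidx, pvBTotal_ite]
    have hrep : (List.replicate 26 (0 : Int)).getD k 0 = 0 := by
      simp only [List.getD, List.getElem?_replicate]
      rw [if_pos hk]
      rfl
    rw [hrep, zero_add]
    apply congrArg List.sum
    apply List.map_congr_left
    intro p hp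
    have hofNat : (Char.ofNat (k + 97)).toNat = k + 97 := by
      rw [Char.toNat_ofNat]
      rw [if_pos (Or.inl (by omega))]
    by_cases hcase : 97 ≤ p.1.toNat
    · by_cases heq : pvIdx p.1 = k
      · have hpeq : p.1 = Char.ofNat (k + 97) := by
          have h1 : pvIdx p.1 = p.1.toNat - 97 := by unfold pvIdx; split <;> omega
          have h2 : p.1.toNat = k + 97 := by omega
          have h3 := congrArg Char.ofNat h2
          rwa [Char.ofNat_toNat] at h3
        rw [if_pos heq, if_pos (show (p.1 == Char.ofNat (k + 97)) = true by simp [hpeq])]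
      · have hne : ¬ p.1 = Char.ofNat (k + 97) := by
          intro hcontra
          apply heq
          have := congrArg Char.toNat hcontra
          rw [hofNat] at this
          unfold pvIdx; split <;> omega
        rw [if_neg heq, if_neg (show ¬ (p.1 == Char.ofNat (k + 97)) = true by
          simp only [beq_iff_eq]; exact fun hcq => hne hcq)]
    · have hz : p.2 = 0 := hwrap p hp (by omega)
      have hne : ¬ p.1 = Char.ofNat (k + 97) := by
        intro hcontra
        have := congrArg Char.toNat hcontra
        rw [hofNat] at this
        omega
      rw [hz, if_neg (show ¬ (p.1 == Char.ofNat (k + 97)) = true by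
        simp only [beq_iff_eq]; exact fun hcq => hne hcq)]
      simp
  simp only [better_compression, better_compression_alt]
  rw [houter, hB]
  dsimp only
  rw [List.drop_zero]
  rw [PySem.List.pyRange_one]
  have habc : "abcdefghijklmnopqrstuvwxyz".toList
      = (List.range 26).map (fun t => Char.ofNat (t + 97)) := by decide
  rw [habc, List.foldl_map, List.foldl_map]
  apply congrArg String.ofList
  apply PySem.List.foldl_congr_mem
  intro acc x hx
  have hx26 : x < 26 := List.mem_range.mp hx
  simp only [zero_add, PySem.List.pyGetD_natCast, Int.toNat_natCast]
  rw [hkey x hx26]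

theorem better_compression_changed : Claim_changed_better_compression := by
  unfold Claim_changed_better_compression
  refine ⟨by decide, by decide, by decide, by decide, by decide, by decide⟩

theorem better_compression_tight : Claim_exact_better_compression := by
  unfold Claim_exact_better_compression
  intro s _hDom hPre hD heq
  -- unpack Pre_
  unfold Pre_better_compression at hPre
  rw [Bool.and_eq_true] at hPre
  obtain ⟨hHeadB, hAllB⟩ := hPre
  have hHead : ∀ c, s.toList.head? = some c → PySem.Chars.isdigit c = false := by
    intro c hc
    rw [hc] at hHeadB
    simpa using hHeadB
  have hAll : ∀ c ∈ s.toList, PySem.Chars.isdigit c = true ∨ (71 ≤ c.toNat ∧ c.toNat ≤ 122) := by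
    intro c hcmem
    have h := (List.all_eq_true.mp hAllB) c hcmem
    rw [Bool.or_eq_true, Bool.and_eq_true] at h
    rcases h with h | h
    · exact Or.inl h
    · exact Or.inr ⟨by exact_mod_cast of_decide_eq_true h.1, by exact_mod_cast of_decide_eq_true h.2⟩
  have houter := pvAOuter_spec s.toList s.toList.length 0 (List.replicate 26 0) (by omega)
      (by omega) (by simp) hAll (by simpa using hHead)
  have htoklead := pvTok_lead s.toList hHead
  have hrng : ∀ p ∈ pvTok s.toList, 71 ≤ p.1.toNat ∧ p.1.toNat ≤ 122 := by
    intro p hp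
    obtain ⟨h1, h2⟩ := htoklead p hp
    rcases hAll p.1 h2 with h | h
    · rw [h1] at h; cases h
    · exact h
  have hidx : ∀ p ∈ pvTok s.toList, pvIdx p.1 < 26 := by
    intro p hp
    have := hrng p hp
    unfold pvIdx; split <;> omega
  have hB : pvBTokens s.toList = pvTok s.toList := by
    unfold pvBTokens
    rw [pvB_main s.toList [] hHead]
    simp
  have hrep : ∀ k : Nat, k < 26 → (List.replicate 26 (0 : Int)).getD k 0 = 0 := by
    intro k hk
    simp only [List.getD, List.getElem?_replicate]
    rw [if_pos hk]
    rfl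
  -- block-decomposed forms of both outputs
  have hA' : better_compression s = String.ofList ((List.range 26).flatMap (pvGfun (fun k =>
      (pvApply (List.replicate 26 0) (pvTok s.toList)).getD k 0))) := by
    simp only [better_compression]
    rw [houter]
    dsimp only
    rw [List.drop_zero, PySem.List.pyRange_one, List.foldl_map]
    apply congrArg String.ofList
    have h26 : ((26 : Int) - 0).toNat = 26 := by decide
    rw [h26]
    refine (pvFold_blocks (List.range 26) _ _ ?_ []).trans (List.nil_append _)
    intro acc k _
    simp only [zero_add, PySem.List.pyGetD_natCast, Int.toNat_natCast, pvGfun]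
    split
    · rfl
    · simp
  have hB' : better_compression_alt s = String.ofList ((List.range 26).flatMap (pvGfun (fun k =>
      pvBTotal (pvTok s.toList) (Char.ofNat (k + 97))))) := by
    simp only [better_compression_alt]
    rw [hB]
    have habc : "abcdefghijklmnopqrstuvwxyz".toList
        = (List.range 26).map (fun t => Char.ofNat (t + 97)) := by decide
    rw [habc, List.foldl_map]
    apply congrArg String.ofList
    refine (pvFold_blocks (List.range 26) _ _ ?_ []).trans (List.nil_append _)
    intro acc k _
    simp only [pvGfun]
    split
    · rfl
    · simp
  rw [hA', hB'] at heq
  have hlist := congrArg String.toList heq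
  rw [String.toList_ofList, String.toList_ofList] at hlist
  -- both value functions are nonnegative
  have hnnA : ∀ k ∈ List.range 26, 0 ≤ (pvApply (List.replicate 26 0) (pvTok s.toList)).getD k 0 := by
    intro k hk
    have hk26 := List.mem_range.mp hk
    rw [pvApply_getD _ _ k (by simp) hk26 hidx, hrep k hk26, zero_add]
    apply List.sum_nonneg
    intro x hx
    obtain ⟨q, hq, hqx⟩ := List.mem_map.mp hx
    subst hqx
    split
    · exact pvTok_val_nonneg s.toList q hq
    · exact le_rfl
  have hnnB : ∀ k ∈ List.range 26, 0 ≤ pvBTotal (pvTok s.toList) (Char.ofNat (k + 97)) := by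
    intro k hk
    rw [pvBTotal_ite]
    apply List.sum_nonneg
    intro x hx
    obtain ⟨q, hq, hqx⟩ := List.mem_map.mp hx
    subst hqx
    split
    · exact pvTok_val_nonneg s.toList q hq
    · exact le_rfl
  -- joined blocks equal ⇒ all 26 values equal
  have hVeq := pvJoin_inj (List.range 26) (fun k hk => List.mem_range.mp hk)
    (List.nodup_range) _ _ hnnA hnnB hlist
  -- D_ gives a wrapped token with positive count
  unfold D_better_compression at hD
  obtain ⟨p, hp, hpw, hppos⟩ := pvScan_to_token s.toList hHead hD
  have hk026 : pvIdx p.1 < 26 := hidx p hp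
  have hveq0 := hVeq (pvIdx p.1) (List.mem_range.mpr hk026)
  -- but A's slot strictly exceeds B's total there
  have hofNat : (Char.ofNat (pvIdx p.1 + 97)).toNat = pvIdx p.1 + 97 := pvOfNat97 _ hk026
  have hstrict : pvBTotal (pvTok s.toList) (Char.ofNat (pvIdx p.1 + 97))
      < (pvApply (List.replicate 26 0) (pvTok s.toList)).getD (pvIdx p.1) 0 := by
    rw [pvApply_getD _ _ _ (by simp) hk026 hidx, hrep _ hk026, zero_add, pvBTotal_ite]
    apply List.sum_lt_sum
    · intro q hq
      by_cases hbq : q.1 = Char.ofNat (pvIdx p.1 + 97)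
      · have hqidx : pvIdx q.1 = pvIdx p.1 := by
          rw [hbq, pvIdx_ofNat _ hk026]
        rw [if_pos (by simp [hbq]), if_pos hqidx]
      · rw [if_neg (by simp [hbq])]
        split
        · exact pvTok_val_nonneg s.toList q hq
        · exact le_rfl
    · refine ⟨p, hp, ?_⟩
      have hne : ¬ (p.1 == Char.ofNat (pvIdx p.1 + 97)) = true := by
        simp only [beq_iff_eq]
        intro hcon
        have h := congrArg Char.toNat hcon
        rw [hofNat] at h
        omega
      rw [if_neg hne, if_pos rfl]
      exact hppos
  omega
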